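-- pv_equiv track=rewrite | github.com/Kavita-lab/Jbhifi_update_29_Nov | Functions.py | find_model
-- ===== SOURCE A (Python) =====
-- def find_model(name):
--     model = None
--     model_found = False
--     n = name.split()
--     for i in n:
--         for j in i:
--             try:
--                 j = int(j)
--                 model_found = True
--                 model = i
--                 return model_found, model
--             except:
--                 model = None
--     return model_found, model
-- ===== SOURCE B (Python) =====
-- def find_model(name):
--     # One forward pass over characters (no split, no nested token loop):
--     # track the start index of the current whitespace-delimited token; on the
--     # first decimal digit, extend to the token's end and slice it out.
--     start = 0
--     for i, c in enumerate(name):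
--         if c.isspace():
--             start = i + 1
--         elif c.isdecimal():
--             j = i
--             while j < len(name) and not name[j].isspace():
--                 j += 1
--             return True, name[start:j]
--     return False, None
-- ===== Notes on version B (the rewrite author's own statement) =====
-- stated objective: faster
-- what changed: Replaces split()-into-a-token-list plus a nested per-token char loop with try/except int() by a single forward character scan that tracks the current token's start index and, on the first decimal digit, slices the token out directly.
import Mathlib
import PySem

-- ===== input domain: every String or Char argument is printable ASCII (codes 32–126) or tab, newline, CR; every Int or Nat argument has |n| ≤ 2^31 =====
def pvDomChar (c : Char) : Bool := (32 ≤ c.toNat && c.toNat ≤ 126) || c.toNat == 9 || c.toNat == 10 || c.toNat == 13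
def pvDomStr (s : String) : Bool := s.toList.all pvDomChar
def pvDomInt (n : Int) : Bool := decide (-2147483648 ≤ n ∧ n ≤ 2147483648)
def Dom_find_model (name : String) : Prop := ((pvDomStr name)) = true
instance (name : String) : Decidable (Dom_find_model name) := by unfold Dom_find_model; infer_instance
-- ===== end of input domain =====

-- B replaces A's split()-into-token-list plus nested per-char try/int() loop by a single
-- forward character scan tracking the current token's start index (objective: faster by
-- constant factor — no token list, no exceptions; equal return values proved on Dom).


-- ===== PORT A =====
-- inner loop 'for j in i: try: int(j) → return True, i; except: model = None'
def fmInner (i : String) : List Char → Option (Bool × Option String)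
  | [] => none
  | j :: rest =>
    match PySem.Int.ofStr? (String.singleton j) with
    | some _ => some (true, some i)
    | none => fmInner i rest

-- outer loop 'for i in n' with the early return propagated
def fmOuter : List String → Bool × Option String
  | [] => (false, none)
  | i :: rest =>
    match fmInner i i.toList with
    | some r => r
    | none => fmOuter rest

def find_model (name : String) : Bool × Option String :=
  fmOuter (PySem.Str.split₀ name)

-- ===== PORT B =====
-- 'while j < len(name) and not name[j].isspace(): j += 1'
def fmFinish (s : List Char) (j : Nat) : Nat :=
  if h : j < s.length then
    if PySem.Chars.isspace s[j] then j else fmFinish s (j + 1)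
  else j
termination_by s.length - j

-- 'for i, c in enumerate(name): …' tracking start; c.isdecimal() on the ASCII domain is
-- exactly PySem.Chars.isdigit; name[start:j] with 0 ≤ start ≤ j is (take j).drop start
def fmLoop (s : List Char) (i start : Nat) : Bool × Option String :=
  if h : i < s.length then
    if PySem.Chars.isspace s[i] then fmLoop s (i + 1) (i + 1)
    else if PySem.Chars.isdigit s[i] then
      (true, some (String.ofList ((s.take (fmFinish s i)).drop start)))
    else fmLoop s (i + 1) start
  else (false, none)
termination_by s.length - i

def find_model_alt (name : String) : Bool × Option String :=
  fmLoop name.toList 0 0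

-- ===== PRECONDITION & SPEC =====
def Spec_find_model (name : String) (out : Bool × Option String) : Prop := out = find_model_alt name
instance (name : String) (out : Bool × Option String) : Decidable (Spec_find_model name out) := by unfold Spec_find_model; infer_instance

-- ===== CLAIM (what is proved, stated in full; the proofs are below) =====
def Claim_equal_find_model : Prop := ∀ (name : String), Dom_find_model name → Spec_find_model name (find_model name)

-- ===== LEMMAS AND PROOFS =====

-- not-a-space, the predicate both scans are really about
def nsp (c : Char) : Bool := !(PySem.Chars.isspace c)

-- str.split() as a structural recursion: the list of maximal non-space runs
def words : List Char → List (List Char)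
  | [] => []
  | c :: t =>
    if PySem.Chars.isspace c then words t
    else (c :: t.takeWhile nsp) :: words (t.dropWhile nsp)
termination_by s => s.length
decreasing_by
  · simp
  · simpa [Nat.lt_succ_iff] using List.length_dropWhile_le nsp t

-- what A's outer/inner loops compute on a token list (after the int() test is reduced)
def fmOuterL : List (List Char) → Bool × Option String
  | [] => (false, none)
  | w :: ws =>
    if w.any PySem.Chars.isdigit then (true, some (String.ofList w)) else fmOuterL ws

-- B's scan, restated on lists: 'pending' is the already-seen part of the current token
def loopL : List Char → List Char → Bool × Option String
  | _, [] => (false, none)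
  | pending, c :: t =>
    if PySem.Chars.isspace c then loopL [] t
    else if PySem.Chars.isdigit c then
      (true, some (String.ofList (pending ++ c :: t.takeWhile nsp)))
    else loopL (pending ++ [c]) t

-- token decomposition of 'pending ++ s' when pending is a (possibly empty) partial token
def wordsP : List Char → List Char → List (List Char)
  | [], s => words s
  | d :: u, s => ((d :: u) ++ s.takeWhile nsp) :: words (s.dropWhile nsp)

theorem takeWhile_append_all {p : Char → Bool} {u : List Char} (v : List Char)
    (h : ∀ c ∈ u, p c) : (u ++ v).takeWhile p = u ++ v.takeWhile p := by
  induction u with | nil => rfl | cons a t ih => simp_all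

theorem dropWhile_append_all {p : Char → Bool} {u : List Char} (v : List Char)
    (h : ∀ c ∈ u, p c) : (u ++ v).dropWhile p = v.dropWhile p := by
  induction u with | nil => rfl | cons a t ih => simp_all

theorem takeWhile_nsp_all {v : List Char} (h : ∀ c ∈ v, PySem.Chars.isspace c = false) :
    v.takeWhile nsp = v := by
  simpa using takeWhile_append_all (p := nsp) [] (u := v) (fun c hc => by simp [nsp, h c hc])

theorem dropWhile_nsp_all {v : List Char} (h : ∀ c ∈ v, PySem.Chars.isspace c = false) :
    v.dropWhile nsp = [] := by
  simpa using dropWhile_append_all (p := nsp) [] (u := v) (fun c hc => by simp [nsp, h c hc])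

-- int(c) on a single domain character succeeds exactly for '0'..'9'
theorem ofStr?_singleton (c : Char) (h : pvDomChar c = true) :
    (PySem.Int.ofStr? (String.singleton c)).isSome = PySem.Chars.isdigit c := by
  have haux : ∀ n : Fin 127,
      (PySem.Int.ofStr? (String.singleton (Char.ofNat n))).isSome
        = PySem.Chars.isdigit (Char.ofNat n) := by decide
  have hlt : c.toNat < 127 := by
    simp only [pvDomChar, Bool.or_eq_true, Bool.and_eq_true, decide_eq_true_eq,
      beq_iff_eq] at h
    omega
  have := haux ⟨c.toNat, hlt⟩
  simpa [Char.ofNat_toNat] using this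

theorem fmInner_eq (i : String) (cs : List Char) (h : ∀ c ∈ cs, pvDomChar c = true) :
    fmInner i cs = if cs.any PySem.Chars.isdigit then some (true, some i) else none := by
  induction cs with
  | nil => rfl
  | cons j rest ih =>
    have hj := ofStr?_singleton j (h j (by simp))
    cases hof : PySem.Int.ofStr? (String.singleton j) with
    | some v =>
      have : PySem.Chars.isdigit j = true := by rw [← hj, hof]; rfl
      simp [fmInner, hof, this]
    | none =>
      have : PySem.Chars.isdigit j = false := by rw [← hj, hof]; rfl
      simp [fmInner, hof, this, ih (fun c hc => h c (by simp [hc]))]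

theorem fmOuter_eq (ws : List (List Char)) (h : ∀ w ∈ ws, ∀ c ∈ w, pvDomChar c = true) :
    fmOuter (ws.map String.ofList) = fmOuterL ws := by
  induction ws with
  | nil => rfl
  | cons w rest ih =>
    have hw : ∀ c ∈ (String.ofList w).toList, pvDomChar c = true := by
      simpa using h w (by simp)
    have hinner := fmInner_eq (String.ofList w) w (by simpa using hw)
    simp only [List.map_cons, fmOuter, String.toList_ofList, hinner, fmOuterL]
    by_cases hd : w.any PySem.Chars.isdigit = true
    · simp [hd]
    · simp only [Bool.not_eq_true] at hd
      simp [hd, ih (fun w' hw' => h w' (by simp [hw']))]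

theorem go_words (s : List Char) : ∀ cur acc, (∀ c ∈ cur, PySem.Chars.isspace c = false) →
    PySem.Chars.split₀.go s cur acc = acc.reverse ++ words (cur.reverse ++ s) := by
  induction s with
  | nil =>
    intro cur acc h
    rcases hr : cur.reverse with _ | ⟨e, v⟩
    · have hc : cur = [] := by rwa [List.reverse_eq_nil_iff] at hr
      subst hc
      simp [PySem.Chars.split₀.go, words]
    · have hemp : cur.isEmpty = false := by
        cases cur with
        | nil => simp at hr
        | cons _ _ => rfl
      have hv : ∀ c ∈ v, PySem.Chars.isspace c = false := fun c hc =>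
        h c (List.mem_reverse.mp (by rw [hr]; exact List.mem_cons_of_mem _ hc))
      have he : PySem.Chars.isspace e = false :=
        h e (List.mem_reverse.mp (by rw [hr]; exact List.mem_cons_self ..))
      rw [List.append_nil]
      rw [show PySem.Chars.split₀.go [] cur acc = (cur.reverse :: acc).reverse from by
        simp [PySem.Chars.split₀.go, hemp]]
      rw [hr, words, if_neg (by simp [he]), takeWhile_nsp_all hv, dropWhile_nsp_all hv]
      simp [words]
  | cons c rest ih =>
    intro cur acc h
    by_cases hsp : PySem.Chars.isspace c = true
    · rcases hr : cur.reverse with _ | ⟨e, v⟩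
      · have hc : cur = [] := by rwa [List.reverse_eq_nil_iff] at hr
        subst hc
        rw [show PySem.Chars.split₀.go (c :: rest) [] acc = PySem.Chars.split₀.go rest [] acc from by
          simp [PySem.Chars.split₀.go, hsp]]
        rw [ih [] acc (by simp)]
        simp [words, hsp]
      · have hemp : cur.isEmpty = false := by
          cases cur with
          | nil => simp at hr
          | cons _ _ => rfl
        have hv : ∀ x ∈ v, PySem.Chars.isspace x = false := fun x hx =>
          h x (List.mem_reverse.mp (by rw [hr]; exact List.mem_cons_of_mem _ hx))
        have he : PySem.Chars.isspace e = false :=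
          h e (List.mem_reverse.mp (by rw [hr]; exact List.mem_cons_self ..))
        rw [show PySem.Chars.split₀.go (c :: rest) cur acc
            = PySem.Chars.split₀.go rest [] (cur.reverse :: acc) from by
          simp [PySem.Chars.split₀.go, hsp, hemp]]
        rw [ih [] (cur.reverse :: acc) (by simp)]
        rw [hr]
        rw [show (e :: v) ++ c :: rest = e :: (v ++ c :: rest) from rfl]
        rw [words, if_neg (by simp [he])]
        rw [takeWhile_append_all _ (fun x hx => by simp [nsp, hv x hx]),
          dropWhile_append_all _ (fun x hx => by simp [nsp, hv x hx])]
        rw [List.takeWhile_cons, List.dropWhile_cons]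
        simp only [nsp, hsp, Bool.not_true, Bool.false_eq_true, if_false]
        rw [words, if_pos hsp]
        simp
    · have hns : PySem.Chars.isspace c = false := by simpa using hsp
      rw [show PySem.Chars.split₀.go (c :: rest) cur acc
          = PySem.Chars.split₀.go rest (c :: cur) acc from by
        simp [PySem.Chars.split₀.go, hns]]
      rw [ih (c :: cur) acc (by
        intro x hx
        rcases List.mem_cons.mp hx with h1 | h2
        · subst h1; exact hns
        · exact h x h2)]
      rw [show (c :: cur).reverse ++ rest = cur.reverse ++ c :: rest from by simp]

theorem split₀_words (s : List Char) : PySem.Chars.split₀ s = words s := by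
  simpa using go_words s [] [] (by simp)

theorem words_chars_mem (s : List Char) : ∀ w ∈ words s, ∀ c ∈ w, c ∈ s := by
  induction s using words.induct with
  | case1 => simp [words]
  | case2 c t hsp ih =>
    intro w hw x hx
    rw [words, if_pos hsp] at hw
    exact List.mem_cons_of_mem _ (ih w hw x hx)
  | case3 c t hsp ih =>
    intro w hw x hx
    rw [words, if_neg hsp] at hw
    rcases List.mem_cons.mp hw with h1 | h2
    · subst h1
      rcases List.mem_cons.mp hx with h1 | h2
      · simp [h1]
      · exact List.mem_cons_of_mem _ (List.Sublist.mem h2 (List.takeWhile_sublist nsp))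
    · exact List.mem_cons_of_mem _ (List.Sublist.mem (ih w h2 x hx) (List.dropWhile_sublist nsp))

theorem loopL_eq (s : List Char) : ∀ pending,
    (∀ c ∈ pending, PySem.Chars.isspace c = false ∧ PySem.Chars.isdigit c = false) →
    loopL pending s = fmOuterL (wordsP pending s) := by
  induction s with
  | nil =>
    intro pending h
    cases pending with
    | nil => simp [loopL, wordsP, words, fmOuterL]
    | cons d u =>
      have hnd : (d :: u).any PySem.Chars.isdigit = false :=
        List.any_eq_false.mpr (fun c hc => by simp [(h c hc).2])
      simp [loopL, wordsP, fmOuterL, hnd, words]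
  | cons c t ih =>
    intro pending h
    by_cases hsp : PySem.Chars.isspace c = true
    · have h1 := ih [] (by simp)
      have h2 : fmOuterL (wordsP pending (c :: t)) = fmOuterL (words t) := by
        cases pending with
        | nil => simp [wordsP, words, hsp]
        | cons d u =>
          have htw : (c :: t).takeWhile nsp = [] := by
            rw [List.takeWhile_cons]
            simp [nsp, hsp]
          have hdw : (c :: t).dropWhile nsp = c :: t := by
            rw [List.dropWhile_cons]
            simp [nsp, hsp]
          have hnd : (d :: u).any PySem.Chars.isdigit = false :=
            List.any_eq_false.mpr (fun x hx => by simp [(h x hx).2])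
          rw [show wordsP (d :: u) (c :: t)
              = ((d :: u) ++ (c :: t).takeWhile nsp) :: words ((c :: t).dropWhile nsp) from rfl]
          rw [htw, hdw, List.append_nil]
          rw [show words (c :: t) = words t from by rw [words, if_pos hsp]]
          rw [fmOuterL]
          simp [hnd]
      rw [loopL, if_pos hsp, h1, h2]
      simp [wordsP]
    · have hns : PySem.Chars.isspace c = false := by simpa using hsp
      have htwc : (c :: t).takeWhile nsp = c :: t.takeWhile nsp := by
        rw [List.takeWhile_cons]; simp [nsp, hns]
      have hdwc : (c :: t).dropWhile nsp = t.dropWhile nsp := by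
        rw [List.dropWhile_cons]; simp [nsp, hns]
      by_cases hdg : PySem.Chars.isdigit c = true
      · have htok : wordsP pending (c :: t)
            = (pending ++ c :: t.takeWhile nsp) :: words (t.dropWhile nsp) := by
          cases pending with
          | nil =>
            rw [show wordsP [] (c :: t) = words (c :: t) from rfl]
            rw [words, if_neg (by simp [hns])]
            simp
          | cons d u =>
            rw [show wordsP (d :: u) (c :: t)
                = ((d :: u) ++ (c :: t).takeWhile nsp) :: words ((c :: t).dropWhile nsp) from rfl]
            rw [htwc, hdwc]
        have hany : (pending ++ c :: t.takeWhile nsp).any PySem.Chars.isdigit = true := by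
          simp [hdg]
        rw [loopL, if_neg (by simp [hns]), if_pos hdg, htok, fmOuterL]
        simp [hany]
      · have hnd : PySem.Chars.isdigit c = false := by simpa using hdg
        have h1 := ih (pending ++ [c]) (by
          intro x hx
          rcases List.mem_append.mp hx with h2 | h2
          · exact h x h2
          · simp only [List.mem_singleton] at h2; subst h2; exact ⟨hns, hnd⟩)
        have h2 : wordsP (pending ++ [c]) t = wordsP pending (c :: t) := by
          cases pending with
          | nil =>
            rw [show wordsP ([] ++ [c]) t = ([c] ++ t.takeWhile nsp) :: words (t.dropWhile nsp) from rfl]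
            rw [show wordsP [] (c :: t) = words (c :: t) from rfl]
            rw [words, if_neg (by simp [hns])]
            simp
          | cons d u =>
            rw [show wordsP ((d :: u) ++ [c]) t
                = ((d :: u) ++ [c] ++ t.takeWhile nsp) :: words (t.dropWhile nsp) from rfl]
            rw [show wordsP (d :: u) (c :: t)
                = ((d :: u) ++ (c :: t).takeWhile nsp) :: words ((c :: t).dropWhile nsp) from rfl]
            rw [htwc, hdwc]
            simp
        rw [loopL, if_neg (by simp [hns]), if_neg (by simp [hnd]), h1, h2]

theorem fmFinish_eq (s : List Char) (i : Nat) :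
    fmFinish s i = i + ((s.drop i).takeWhile nsp).length := by
  induction i using fmFinish.induct s with
  | case1 i h hsp =>
    rw [fmFinish, dif_pos h, if_pos hsp]
    rw [List.drop_eq_getElem_cons h, List.takeWhile_cons]
    simp only [nsp, hsp, Bool.not_true, Bool.false_eq_true, if_false, List.length_nil]
    omega
  | case2 i h hsp ih =>
    rw [fmFinish, dif_pos h, if_neg hsp, ih]
    rw [List.drop_eq_getElem_cons h, List.takeWhile_cons]
    simp only [Bool.not_eq_true] at hsp
    simp only [nsp, hsp, Bool.not_false, if_true, List.length_cons]
    omega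
  | case3 i h =>
    rw [fmFinish, dif_neg h]
    rw [List.drop_eq_nil_of_le (by omega)]
    simp
theorem fmLoop_eq (s : List Char) (i start : Nat) : start ≤ i →
    fmLoop s i start = loopL ((s.take i).drop start) (s.drop i) := by
  induction i, start using fmLoop.induct s with
  | case1 i start h hsp ih =>
    intro hle
    have hnil : (s.take (i + 1)).drop (i + 1) = [] :=
      List.drop_eq_nil_of_le (by simp)
    rw [fmLoop, dif_pos h, if_pos hsp, ih (by omega), hnil]
    rw [List.drop_eq_getElem_cons h, loopL, if_pos hsp]
  | case2 i start h hsp hdg =>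
    intro hle
    have hnssi : PySem.Chars.isspace s[i] = false := by simpa using hsp
    have hfin : fmFinish s i = i + (1 + ((s.drop (i + 1)).takeWhile nsp).length) := by
      rw [fmFinish_eq]
      rw [List.drop_eq_getElem_cons h, List.takeWhile_cons]
      simp only [nsp, hnssi, Bool.not_false, if_true, List.length_cons]
      omega
    have hlen : start ≤ (s.take i).length := by
      rw [List.length_take]
      omega
    have hpre : (s.drop (i + 1)).takeWhile nsp
        = (s.drop (i + 1)).take ((s.drop (i + 1)).takeWhile nsp).length :=
      List.prefix_iff_eq_take.mp (List.takeWhile_prefix nsp)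
    have hdropi : (s.drop i).take (1 + ((s.drop (i + 1)).takeWhile nsp).length)
        = s[i] :: (s.drop (i + 1)).takeWhile nsp := by
      rw [List.drop_eq_getElem_cons h, Nat.add_comm 1, List.take_succ_cons]
      exact congrArg _ hpre.symm
    rw [fmLoop, dif_pos h, if_neg hsp, if_pos hdg]
    rw [List.drop_eq_getElem_cons h, loopL, if_neg hsp, if_pos hdg]
    rw [hfin, List.take_add, List.drop_append_of_le_length hlen, hdropi]
  | case3 i start h hsp hdg ih =>
    intro hle
    have htake : (s.take (i + 1)).drop start = (s.take i).drop start ++ [s[i]] := by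
      rw [List.take_add_one, List.getElem?_eq_getElem h]
      rw [List.drop_append_of_le_length (by rw [List.length_take]; omega)]
      rfl
    rw [fmLoop, dif_pos h, if_neg hsp, if_neg hdg, ih (by omega), htake]
    rw [List.drop_eq_getElem_cons h, loopL, if_neg hsp, if_neg hdg]
  | case4 i start h =>
    intro hle
    rw [fmLoop, dif_neg h]
    have hnil : s.drop i = [] := List.drop_eq_nil_of_le (by omega)
    rw [hnil]
    simp [loopL]

-- ===== VERDICT (by name: the statement is the Claim_ definition above) =====
theorem find_model_spec : Claim_equal_find_model := by
  intro name hdom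
  unfold Spec_find_model find_model find_model_alt
  have hs : ∀ c ∈ name.toList, pvDomChar c = true := by
    intro c hc
    have := hdom
    unfold Dom_find_model pvDomStr at this
    exact List.all_eq_true.mp this c hc
  have h1 : PySem.Str.split₀ name = (words name.toList).map String.ofList := by
    unfold PySem.Str.split₀
    rw [split₀_words]
  rw [h1, fmOuter_eq _ (fun w hw c hc => hs c (words_chars_mem name.toList w hw c hc))]
  rw [fmLoop_eq name.toList 0 0 (by omega)]
  simp only [List.take_zero, List.drop_nil, List.drop_zero]
  rw [loopL_eq name.toList [] (by simp)]
  rfl
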